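-- pv_equiv track=rewrite | github.com/amandavical/estrutura-de-dados | lista1/recursividade.py | zeraPares
-- ===== SOURCE A (Python) =====
-- def zeraPares(n):
--     if n < 10:
--         return n
--     menor_resto = zeraPares(n // 10) #numero sem o ultimo digito
--     ultimo_digito = n % 10 #ultimo digito
--     if ultimo_digito % 2 == 0:
--         return menor_resto * 10 # Se par, zera (multiplica por 10)
--     else:
--         return menor_resto * 10 + ultimo_digito # Se ímpar, mantém
-- ===== SOURCE B (Python) =====
-- def zeraPares(n):
--     if n < 10:
--         return n
--     digits = []
--     while n >= 10:
--         digits.append(n % 10)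
--         n //= 10
--     result = n  # leading digit, always kept
--     for d in reversed(digits):
--         result = result * 10 + (d if d % 2 == 1 else 0)
--     return result
-- ===== Notes on version B (the rewrite author's own statement) =====
-- stated objective: alternative
-- what changed: Replaces the most-significant-first recursion by an explicit iterative digit stack: a while-loop peels digits least-significant-first, then a single fold rebuilds the number zeroing even digits (leading digit kept).
import Mathlib
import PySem

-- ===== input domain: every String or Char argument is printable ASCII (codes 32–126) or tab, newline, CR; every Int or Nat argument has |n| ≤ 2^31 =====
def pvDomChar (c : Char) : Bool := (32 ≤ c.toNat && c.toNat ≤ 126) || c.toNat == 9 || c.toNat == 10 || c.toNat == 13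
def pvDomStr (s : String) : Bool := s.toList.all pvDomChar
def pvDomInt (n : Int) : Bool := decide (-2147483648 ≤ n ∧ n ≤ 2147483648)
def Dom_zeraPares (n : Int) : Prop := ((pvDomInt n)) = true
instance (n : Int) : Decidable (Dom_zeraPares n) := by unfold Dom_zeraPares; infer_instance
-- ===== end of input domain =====

-- B replaces A's most-significant-first recursion by an explicit iterative digit stack
-- (peel digits with a while-loop, then rebuild in one fold); alternative decomposition, same cost.

-- ===== PORT A =====
def zeraPares (n : Int) : Int :=
  if n < 10 then n
  else
    let menor_resto := zeraPares (PySem.Int.floordiv n 10)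
    let ultimo_digito := PySem.Int.mod n 10
    if PySem.Int.mod ultimo_digito 2 == 0 then menor_resto * 10
    else menor_resto * 10 + ultimo_digito
termination_by n.toNat
decreasing_by
  rw [PySem.Int.floordiv_eq_ediv_of_pos (by omega : (0:Int) < 10)]
  omega

-- ===== PORT B =====
-- the while-loop of Source B: peel digits least-significant-first onto a stack
def collectDigits (n : Int) (digits : List Int) : Int × List Int :=
  if n ≥ 10 then
    collectDigits (PySem.Int.floordiv n 10) (digits ++ [PySem.Int.mod n 10])
  else (n, digits)
termination_by n.toNat
decreasing_by
  rw [PySem.Int.floordiv_eq_ediv_of_pos (by omega : (0:Int) < 10)]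
  omega

def zeraPares_alt (n : Int) : Int :=
  if n < 10 then n
  else
    let p := collectDigits n []
    p.2.reverse.foldl
      (fun r d => r * 10 + (if PySem.Int.mod d 2 == 1 then d else 0)) p.1

-- ===== PRECONDITION & SPEC =====
def Spec_zeraPares (n : Int) (out : Int) : Prop := out = zeraPares_alt n
instance (n : Int) (out : Int) : Decidable (Spec_zeraPares n out) := by unfold Spec_zeraPares; infer_instance

-- ===== CLAIM (what is proved, stated in full; the proofs are below) =====
def Claim_equal_zeraPares : Prop := ∀ (n : Int), Dom_zeraPares n → Spec_zeraPares n (zeraPares n)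

-- ===== LEMMAS AND PROOFS =====

-- one fold step on a peeled digit is exactly A's recursive step
theorem step_eq (mr ud : Int) :
    mr * 10 + (if PySem.Int.mod ud 2 == 1 then ud else 0) =
      (if PySem.Int.mod ud 2 == 0 then mr * 10 else mr * 10 + ud) := by
  have h0 := PySem.Int.mod_nonneg ud (b := 2) (by omega)
  have h1 := PySem.Int.mod_lt ud (b := 2) (by omega)
  interval_cases h : PySem.Int.mod ud 2 <;> simp

-- A's unfolding on a multi-digit input
theorem zeraPares_step (n : Int) (h : ¬ n < 10) :
    zeraPares n =
      (if PySem.Int.mod (PySem.Int.mod n 10) 2 == 0 then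
        zeraPares (PySem.Int.floordiv n 10) * 10
      else zeraPares (PySem.Int.floordiv n 10) * 10 + PySem.Int.mod n 10) := by
  rw [zeraPares, if_neg h]

-- invariant of the digit stack: folding the collected digits continues A's recursion
theorem collect_foldl (n : Int) (acc : List Int) :
    ((collectDigits n acc).2.reverse.foldl
      (fun r d => r * 10 + (if PySem.Int.mod d 2 == 1 then d else 0))
      (collectDigits n acc).1) =
    acc.reverse.foldl
      (fun r d => r * 10 + (if PySem.Int.mod d 2 == 1 then d else 0))
      (zeraPares n) := by
  induction n, acc using collectDigits.induct with
  | case1 n acc hge ih =>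
    rw [collectDigits, if_pos hge, ih, zeraPares_step n (by omega)]
    simp only [List.reverse_append, List.reverse_singleton, List.singleton_append,
      List.foldl_cons]
    rw [step_eq]
  | case2 n acc hlt =>
    rw [collectDigits, if_neg hlt, zeraPares, if_pos (by omega)]

theorem zeraPares_spec : Claim_equal_zeraPares := by
  intro n _
  show zeraPares n = zeraPares_alt n
  unfold zeraPares_alt
  split
  · rw [zeraPares]; simp [*]
  · rw [collect_foldl n []]; simp
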